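-- pv_equiv track=rewrite | github.com/vanpersie9987/vanpersie9987 | luogu1.py | leverNumber
-- ===== SOURCE A (Python) =====
-- from functools import cache
--
-- def leverNumber(left: int, right: int) -> int:
--     def solve(num: str) -> int:
--         @cache
--         def dfs(i: int, j: int, k: int, is_limit: bool, is_num: bool) -> int:
--             if i == n:
--                 return is_num and k == 0
--             if k < 0:
--                 return 0
--             res = 0
--             if not is_num:
--                 res = dfs(i + 1, j, k, False, False)
--             up = int(num[i]) if is_limit else 9
--             for d in range(0 if is_num else 1, up + 1):
--                 res += dfs(i + 1, j, k + (j - i) * d, is_limit and d == up, True)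
--             return res
--         n = len(num)
--         return sum(dfs(0, i, 0, True, False) for i in range(n))
--     return solve(str(right)) - solve(str(left - 1))
-- ===== SOURCE B (Python) =====
-- def leverNumber(left: int, right: int) -> int:
--     return _count(right) - _count(left - 1)
--
--
-- def _count(N: int) -> int:
--     # numbers in [1, N], each counted once per balanced pivot position
--     if N < 0:
--         return 0
--     digits = [ord(c) - 48 for c in str(N)]
--     n = len(digits)
--     total = 0
--     for j in range(n):
--         # tables[i] : torque -> #ways to fill positions i..n-1 freely (digits 0-9)
--         tables = [{0: 1}]
--         for i in reversed(range(n)):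
--             cur = {}
--             for t, c in tables[0].items():
--                 for d in range(10):
--                     key = t + (j - i) * d
--                     cur[key] = cur.get(key, 0) + c
--             tables.insert(0, cur)
--         torque = 0
--         cnt = 0
--         for i in range(n):
--             for d in range(digits[i]):
--                 cnt += tables[i + 1].get(-(torque + (j - i) * d), 0)
--             torque += (j - i) * digits[i]
--         if torque == 0:
--             cnt += 1
--         total += cnt - 1  # drop the all-zero padded string (the number 0)
--     return total
-- ===== Notes on version B (the rewrite author's own statement) =====
-- stated objective: alternative
-- what changed: Replaces A's memoized 5-argument top-down digit-DP recursion by an iterative bottom-up table DP: for each pivot it precomputes torque-count tables for every suffix of free positions, then a single forward scan over str(N) sums table lookups for digits below the tight bound; numbers shorter than str(N) are handled by counting zero-padded strings and subtracting the all-zero string instead of A's is_num state.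
import Mathlib
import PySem

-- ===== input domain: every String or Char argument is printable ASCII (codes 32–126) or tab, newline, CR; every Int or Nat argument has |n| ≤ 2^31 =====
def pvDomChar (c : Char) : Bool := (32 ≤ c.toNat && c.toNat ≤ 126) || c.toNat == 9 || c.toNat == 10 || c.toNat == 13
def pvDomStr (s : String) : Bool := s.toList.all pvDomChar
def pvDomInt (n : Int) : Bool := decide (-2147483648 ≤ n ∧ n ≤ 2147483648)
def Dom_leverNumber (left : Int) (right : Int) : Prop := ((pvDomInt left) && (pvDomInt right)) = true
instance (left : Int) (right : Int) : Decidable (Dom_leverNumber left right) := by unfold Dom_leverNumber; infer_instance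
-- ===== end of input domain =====

-- B replaces A's memoized 5-argument digit recursion by an iterative table-based digit DP
-- (explicit per-pivot torque-count tables plus one forward tight scan); objective: alternative.

-- ===== PORT A =====
-- int(num[i]) on a single char; exact on Pre_ (digit chars only — ofChars? is `some` there)
def pyDigitA (c : Char) : Int := (PySem.Int.ofChars? [c]).getD 0

-- @cache: the memo dictionary is threaded explicitly; keys are dfs's argument tuples
def dfsM (j : Int) : List Char → Int → Int → Bool → Bool →
    Std.HashMap (Int × Int × Int × Bool × Bool) Int →
    Int × Std.HashMap (Int × Int × Int × Bool × Bool) Int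
  | rest, i, k, islimit, isnum, cache =>
    match cache.get? (i, j, k, islimit, isnum) with
    | some v => (v, cache)
    | none =>
      let r :=
        match rest with
        | [] => ((if isnum && k == 0 then (1 : Int) else 0), cache)
        | c :: rest =>
          if k < 0 then ((0 : Int), cache)
          else
            let p0 := if !isnum then dfsM j rest (i + 1) k false false cache else (0, cache)
            let up : Int := if islimit then pyDigitA c else 9
            (PySem.List.pyRange (if isnum then 0 else 1) (up + 1) 1).foldl
              (fun p d =>
                let q := dfsM j rest (i + 1) (k + (j - i) * d) (islimit && (d == up)) true p.2
                (p.1 + q.1, q.2)) p0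
      (r.1, r.2.insert (i, j, k, islimit, isnum) r.1)

def solveA (num : List Char) : Int :=
  ((PySem.List.pyRange 0 (PySem.List.len num) 1).foldl
    (fun p i =>
      let q := dfsM i num 0 0 true false p.2
      (p.1 + q.1, q.2))
    ((0 : Int), (∅ : Std.HashMap (Int × Int × Int × Bool × Bool) Int))).1

def leverNumber (left : Int) (right : Int) : Int :=
  solveA (PySem.Int.toChars right) - solveA (PySem.Int.toChars (left - 1))

-- ===== PORT B =====
-- ord(c) - 48 for a char of str(N)
def pyDigitB (c : Char) : Int := (c.toNat : Int) - 48

-- body of `for i in reversed(range(n))`: prepend the table for position i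
def buildStepB (j : Int) (tables : List (PySem.Dict Int Int)) (i : Int) : List (PySem.Dict Int Int) :=
  let prev := PySem.List.pyGetD tables 0 (PySem.Dict.mk [])
  let cur := prev.items.foldl
    (fun cur tc =>
      (PySem.List.pyRange 0 10 1).foldl
        (fun cur d => cur.modify (tc.1 + (j - i) * d) 0 (· + tc.2)) cur)
    (PySem.Dict.mk [])
  PySem.List.insert tables 0 cur

def buildTablesB (j : Int) (n : Int) : List (PySem.Dict Int Int) :=
  ((PySem.List.pyRange 0 n 1).reverse).foldl (buildStepB j) [PySem.Dict.mk [((0 : Int), (1 : Int))]]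

-- body of the forward tight scan: state is (torque, cnt)
def scanStepB (j : Int) (ds : List Int) (tables : List (PySem.Dict Int Int))
    (tk : Int × Int) (i : Int) : Int × Int :=
  let di := PySem.List.pyGetD ds i 0
  let c := (PySem.List.pyRange 0 di 1).foldl
    (fun cnt d =>
      cnt + (PySem.List.pyGetD tables (i + 1) (PySem.Dict.mk [])).getD (-(tk.1 + (j - i) * d)) 0)
    tk.2
  (tk.1 + (j - i) * di, c)

def countB (N : Int) : Int :=
  if N < 0 then 0
  else
    let ds := (PySem.Int.toChars N).map pyDigitB
    let n : Int := PySem.List.len ds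
    (PySem.List.pyRange 0 n 1).foldl
      (fun total j =>
        let tables := buildTablesB j n
        let tk := (PySem.List.pyRange 0 n 1).foldl (scanStepB j ds tables) (0, 0)
        let cnt := if tk.1 == 0 then tk.2 + 1 else tk.2
        total + (cnt - 1)) 0

def leverNumber_alt (left : Int) (right : Int) : Int :=
  countB right - countB (left - 1)

-- ===== PRECONDITION & SPEC =====
-- A raises ValueError (int('-') on the sign character of str(right) / str(left-1)) iff right < 0 or left ≤ 0;
-- Pre_ admits exactly the inputs where A returns.
def Pre_leverNumber (left : Int) (right : Int) : Prop := 1 ≤ left ∧ 0 ≤ right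
instance (left : Int) (right : Int) : Decidable (Pre_leverNumber left right) := by
  unfold Pre_leverNumber; infer_instance
def pvWitness_leverNumber : Int × Int := (1, 20)

def Spec_leverNumber (left : Int) (right : Int) (out : Int) : Prop := out = leverNumber_alt left right
instance (left : Int) (right : Int) (out : Int) : Decidable (Spec_leverNumber left right out) := by
  unfold Spec_leverNumber; infer_instance

-- ===== CLAIM (what is proved, stated in full; the proofs are below) =====
def Claim_equal_leverNumber : Prop := ∀ (left : Int) (right : Int), Dom_leverNumber left right → Pre_leverNumber left right → Spec_leverNumber left right (leverNumber left right)

-- ===== LEMMAS AND PROOFS =====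

-- the mathematical (cache-free) value of A's dfs; dfsM below is proved to compute it
def dfsA (j : Int) : List Char → Int → Int → Bool → Bool → Int
  | [], _, k, _, isnum => if isnum && k == 0 then 1 else 0
  | c :: rest, i, k, islimit, isnum =>
      if k < 0 then 0
      else
        let res0 : Int := if !isnum then dfsA j rest (i + 1) k false false else 0
        let up : Int := if islimit then pyDigitA c else 9
        (PySem.List.pyRange (if isnum then 0 else 1) (up + 1) 1).foldl
          (fun res d => res + dfsA j rest (i + 1) (k + (j - i) * d) (islimit && (d == up)) true) res0

def CacheValidA (num : List Char) (c : Std.HashMap (Int × Int × Int × Bool × Bool) Int) : Prop :=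
  ∀ (i j k : Int) (l nm : Bool) (v : Int), c.get? (i, j, k, l, nm) = some v →
    0 ≤ i ∧ v = dfsA j (num.drop i.toNat) i k l nm

lemma hm_get?_insert (m : Std.HashMap (Int × Int × Int × Bool × Bool) Int)
    (k a : Int × Int × Int × Bool × Bool) (v : Int) :
    (m.insert k v).get? a = if k == a then some v else m.get? a := by
  simp [Std.HashMap.get?_eq_getElem?, Std.HashMap.getElem?_insert]

lemma cacheValidA_insert (num : List Char) (i j k : Int) (l nm : Bool)
    (c : Std.HashMap (Int × Int × Int × Bool × Bool) Int) (res : Int)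
    (hval : CacheValidA num c) (hi : 0 ≤ i)
    (hres : res = dfsA j (num.drop i.toNat) i k l nm) :
    CacheValidA num (c.insert (i, j, k, l, nm) res) := by
  intro i' j' k' l' nm' v' h
  rw [hm_get?_insert] at h
  split_ifs at h with hkey
  · rw [beq_iff_eq] at hkey
    simp only [Prod.mk.injEq] at hkey
    obtain ⟨rfl, rfl, rfl, rfl, rfl⟩ := hkey
    cases h
    exact ⟨hi, hres⟩
  · exact hval i' j' k' l' nm' v' h

lemma dfsM_spec (num : List Char) (j : Int) :
    ∀ (rest : List Char) (i k : Int) (l nm : Bool)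
      (c : Std.HashMap (Int × Int × Int × Bool × Bool) Int),
      CacheValidA num c → 0 ≤ i → num.drop i.toNat = rest →
      (dfsM j rest i k l nm c).1 = dfsA j rest i k l nm
        ∧ CacheValidA num (dfsM j rest i k l nm c).2 := by
  intro rest
  induction rest with
  | nil =>
    intro i k l nm c hval hi hdrop
    rw [dfsM]
    cases hc : c.get? (i, j, k, l, nm) with
    | some v =>
      dsimp only
      obtain ⟨_, hv⟩ := hval i j k l nm v hc
      rw [hdrop] at hv
      exact ⟨hv, hval⟩
    | none =>
      dsimp only
      refine ⟨rfl, ?_⟩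
      exact cacheValidA_insert num i j k l nm c _ hval hi (by rw [hdrop]; rfl)
  | cons ch rest ih =>
    intro i k l nm c hval hi hdrop
    have hdrop' : num.drop (i + 1).toNat = rest := by
      rw [show (i + 1).toNat = i.toNat + 1 from by omega, ← List.tail_drop, hdrop]
      rfl
    rw [dfsM]
    cases hc : c.get? (i, j, k, l, nm) with
    | some v =>
      dsimp only
      obtain ⟨_, hv⟩ := hval i j k l nm v hc
      rw [hdrop] at hv
      exact ⟨hv, hval⟩
    | none =>
      dsimp only
      by_cases hneg : k < 0
      · rw [if_pos hneg]
        dsimp only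
        constructor
        · simp only [dfsA]
          rw [if_pos hneg]
        · exact cacheValidA_insert num i j k l nm c _ hval hi (by
            rw [hdrop]
            simp only [dfsA]
            rw [if_pos hneg])
      · rw [if_neg hneg]
        -- the starting pair (non-num skip branch)
        have hinit : ((if !nm then dfsM j rest (i + 1) k false false c else (0, c)).1
              = (if !nm then dfsA j rest (i + 1) k false false else 0))
            ∧ CacheValidA num (if !nm then dfsM j rest (i + 1) k false false c else (0, c)).2 := by
          cases nm with
          | true => simpa using hval
          | false =>
            simp only [Bool.not_false, if_true]
            exact ih (i + 1) k false false c hval (by omega) hdrop'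
        -- the digit loop threads the cache through
        have hfold : ∀ (L : List Int) (p : Int × Std.HashMap (Int × Int × Int × Bool × Bool) Int),
            CacheValidA num p.2 →
            ((L.foldl (fun p d =>
                let q := dfsM j rest (i + 1) (k + (j - i) * d)
                  (l && (d == (if l then pyDigitA ch else 9))) true p.2
                (p.1 + q.1, q.2)) p).1
              = L.foldl (fun res d => res + dfsA j rest (i + 1) (k + (j - i) * d)
                  (l && (d == (if l then pyDigitA ch else 9))) true) p.1)
            ∧ CacheValidA num ((L.foldl (fun p d =>
                let q := dfsM j rest (i + 1) (k + (j - i) * d)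
                  (l && (d == (if l then pyDigitA ch else 9))) true p.2
                (p.1 + q.1, q.2)) p).2) := by
          intro L
          induction L with
          | nil => intro p hp; exact ⟨rfl, hp⟩
          | cons d L ihL =>
            intro p hp
            simp only [List.foldl_cons]
            obtain ⟨hq1, hq2⟩ := ih (i + 1) (k + (j - i) * d)
              (l && (d == (if l then pyDigitA ch else 9))) true p.2 hp (by omega) hdrop'
            obtain ⟨hL1, hL2⟩ := ihL
              (p.1 + (dfsM j rest (i + 1) (k + (j - i) * d)
                (l && (d == (if l then pyDigitA ch else 9))) true p.2).1,
               (dfsM j rest (i + 1) (k + (j - i) * d)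
                (l && (d == (if l then pyDigitA ch else 9))) true p.2).2) hq2
            refine ⟨?_, hL2⟩
            rw [hL1, hq1]
        obtain ⟨hf1, hf2⟩ := hfold (PySem.List.pyRange (if nm then 0 else 1)
            ((if l then pyDigitA ch else 9) + 1) 1)
          (if !nm then dfsM j rest (i + 1) k false false c else (0, c)) hinit.2
        constructor
        · dsimp only
          rw [hf1, hinit.1]
          simp only [dfsA]
          rw [if_neg hneg]
        · dsimp only
          refine cacheValidA_insert num i j k l nm _ _ hf2 hi ?_
          rw [hf1, hinit.1, hdrop]
          simp only [dfsA]
          rw [if_neg hneg]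

lemma emptyCacheValid (num : List Char) :
    CacheValidA num (∅ : Std.HashMap (Int × Int × Int × Bool × Bool) Int) := by
  intro i j k l nm v h
  rw [Std.HashMap.get?_eq_getElem?] at h
  simp at h

lemma solveA_eq (num : List Char) :
    solveA num = ((PySem.List.pyRange 0 (PySem.List.len num) 1).map
      (fun i => dfsA i num 0 0 true false)).sum := by
  have hstep : ∀ (L : List Int) (p : Int × Std.HashMap (Int × Int × Int × Bool × Bool) Int),
      CacheValidA num p.2 →
      ((L.foldl (fun p i =>
          let q := dfsM i num 0 0 true false p.2
          (p.1 + q.1, q.2)) p).1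
        = L.foldl (fun r i => r + dfsA i num 0 0 true false) p.1)
      ∧ CacheValidA num ((L.foldl (fun p i =>
          let q := dfsM i num 0 0 true false p.2
          (p.1 + q.1, q.2)) p).2) := by
    intro L
    induction L with
    | nil => intro p hp; exact ⟨rfl, hp⟩
    | cons jj L ihL =>
      intro p hp
      simp only [List.foldl_cons]
      obtain ⟨hq1, hq2⟩ := dfsM_spec num jj num 0 0 true false p.2 hp (by omega) (by simp)
      obtain ⟨hL1, hL2⟩ := ihL
        (p.1 + (dfsM jj num 0 0 true false p.2).1, (dfsM jj num 0 0 true false p.2).2)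
        hq2
      refine ⟨?_, hL2⟩
      rw [hL1, hq1]
  unfold solveA
  rw [(hstep (PySem.List.pyRange 0 (PySem.List.len num) 1)
    ((0 : Int), (∅ : Std.HashMap (Int × Int × Int × Bool × Bool) Int))
    (emptyCacheValid num)).1]
  rw [PySem.List.foldl_add (PySem.List.pyRange 0 (PySem.List.len num) 1)
    (fun i => dfsA i num 0 0 true false) 0, zero_add]


-- number of ways to fill positions i, i+1, ..., i+m-1 with digits 0-9 so that the torque about pivot j is t
def Wm (j : Int) : Nat → Int → Int → Int
  | 0, _, t => if t = 0 then 1 else 0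
  | m + 1, i, t =>
      ((PySem.List.pyRange 0 10 1).map (fun d => Wm j m (i + 1) (t - (j - i) * d))).sum

def scanS (j : Int) : List Int → Int → Int → Int
  | [], _, k => if k = 0 then 1 else 0
  | d :: rest, i, k =>
      ((PySem.List.pyRange 0 d 1).map (fun e => Wm j rest.length (i + 1) (-(k + (j - i) * e)))).sum
      + scanS j rest (i + 1) (k + (j - i) * d)

lemma Wm_nonneg_arg_zero (j : Int) (m : Nat) : ∀ (i t : Int), j < i → 0 < t → Wm j m i t = 0 := by
  induction m with
  | zero => intro i t hj ht; simp only [Wm]; rw [if_neg (by omega)]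
  | succ m ih =>
    intro i t hj ht
    simp only [Wm]
    rw [List.map_congr_left (g := fun d => (0 : Int)) (by
      intro d hd
      rw [PySem.List.mem_pyRange_one] at hd
      exact ih (i + 1) _ (by omega) (by nlinarith [hd.1, hd.2]))]
    simp

lemma pyDigitA_digitChar (m : Nat) (hm : m < 10) : pyDigitA (Nat.digitChar m) = (m : Int) := by
  interval_cases m <;> decide

lemma dfsA_free (j : Int) (rest : List Char) : ∀ (i k : Int), (0 ≤ k ∨ j < i) →
    dfsA j rest i k false true = Wm j rest.length i (-k) := by
  induction rest with
  | nil =>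
    intro i k h
    simp only [dfsA, Wm, List.length_nil]
    rcases eq_or_ne k 0 with hk | hk <;> simp [hk]
  | cons c rest ih =>
    intro i k h
    simp only [dfsA, List.length_cons]
    by_cases hneg : k < 0
    · rw [if_pos hneg, Wm_nonneg_arg_zero j _ i (-k) (by omega) (by omega)]
    · rw [if_neg hneg]
      simp only [Bool.not_true, Bool.false_eq_true, Bool.false_and, if_false, if_true]
      rw [PySem.List.foldl_add (PySem.List.pyRange 0 (9 + 1) 1)
        (fun d => dfsA j rest (i + 1) (k + (j - i) * d) false true) 0]
      rw [List.map_congr_left (g := fun d => Wm j rest.length (i + 1) (-k - (j - i) * d)) (by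
        intro d hd
        rw [PySem.List.mem_pyRange_one] at hd
        rw [ih (i + 1) (k + (j - i) * d) (by
          rcases h with h | h
          · by_cases hij : j < i + 1
            · exact Or.inr hij
            · exact Or.inl (by nlinarith [hd.1])
          · exact Or.inr (by omega))]
        congr 1
        ring)]
      simp only [Wm, zero_add]
      norm_num

lemma dfsA_skip (j : Int) (rest : List Char) : ∀ (i : Int),
    dfsA j rest i 0 false false = Wm j rest.length i 0 - 1 := by
  induction rest with
  | nil => intro i; simp [dfsA, Wm]
  | cons c rest ih =>
    intro i
    simp only [dfsA, List.length_cons]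
    rw [if_neg (by omega)]
    simp only [Bool.not_false, Bool.false_eq_true, Bool.false_and, if_false, if_true]
    rw [PySem.List.foldl_add (PySem.List.pyRange 1 (9 + 1) 1)
      (fun d => dfsA j rest (i + 1) (0 + (j - i) * d) false true) (dfsA j rest (i + 1) 0 false false)]
    rw [ih (i + 1)]
    rw [List.map_congr_left (g := fun d => Wm j rest.length (i + 1) (0 - (j - i) * d)) (by
      intro d hd
      rw [PySem.List.mem_pyRange_one] at hd
      rw [dfsA_free j rest (i + 1) (0 + (j - i) * d) (by
        by_cases hij : j < i + 1
        · exact Or.inr hij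
        · exact Or.inl (by nlinarith [hd.1]))]
      congr 1
      ring)]
    simp only [Wm]
    rw [show PySem.List.pyRange 0 10 1 = 0 :: PySem.List.pyRange 1 10 1 from
      PySem.List.pyRange_one_cons (by norm_num)]
    simp only [List.map_cons, List.sum_cons, mul_zero, sub_zero]
    ring

lemma scanS_neg (j : Int) (ds : List Int) : ∀ (i k : Int), (∀ x ∈ ds, 0 ≤ x) → j < i → k < 0 →
    scanS j ds i k = 0 := by
  induction ds with
  | nil => intro i k _ _ hk; simp only [scanS]; rw [if_neg (by omega)]
  | cons d rest ih =>
    intro i k hd hj hk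
    simp only [scanS]
    rw [List.map_congr_left (g := fun e => (0 : Int)) (by
      intro e he
      rw [PySem.List.mem_pyRange_one] at he
      rw [Wm_nonneg_arg_zero j rest.length (i + 1) (-(k + (j - i) * e)) (by omega)
        (by nlinarith [he.1])])]
    rw [ih (i + 1) (k + (j - i) * d) (fun x hx => hd x (by simp [hx])) (by omega)
      (by nlinarith [hd d (by simp)])]
    simp

lemma digits_nonneg (l : List Char) (hd : ∀ c' ∈ l, ∃ m : Nat, m < 10 ∧ c' = Nat.digitChar m) :
    ∀ x ∈ l.map pyDigitA, 0 ≤ x := by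
  intro x hx
  obtain ⟨c', hc', rfl⟩ := List.mem_map.1 hx
  obtain ⟨m, hm, rfl⟩ := hd c' hc'
  rw [pyDigitA_digitChar m hm]
  positivity

lemma dfsA_tight (j : Int) (rest : List Char) : ∀ (i k : Int),
    (∀ c' ∈ rest, ∃ m : Nat, m < 10 ∧ c' = Nat.digitChar m) → (0 ≤ k ∨ j < i) →
    dfsA j rest i k true true = scanS j (rest.map pyDigitA) i k := by
  induction rest with
  | nil =>
    intro i k _ _
    simp only [dfsA, List.map_nil, scanS]
    rcases eq_or_ne k 0 with hk | hk <;> simp [hk]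
  | cons c rest ih =>
    intro i k hd h
    obtain ⟨m, hm, hc⟩ := hd c (List.mem_cons_self)
    have hd0 : pyDigitA c = (m : Int) := by rw [hc]; exact pyDigitA_digitChar m hm
    simp only [dfsA, List.map_cons]
    by_cases hneg : k < 0
    · rw [if_pos hneg,
        scanS_neg j (pyDigitA c :: rest.map pyDigitA) i k (by
          intro x hx
          rcases List.mem_cons.1 hx with hx | hx
          · rw [hx, hd0]; positivity
          · exact digits_nonneg rest (fun c' hc' => hd c' (List.mem_cons_of_mem c hc')) x hx)
        (by omega) hneg]
    · rw [if_neg hneg]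
      simp only [Bool.not_true, Bool.false_eq_true, if_false, if_true]
      rw [hd0]
      rw [show PySem.List.pyRange 0 ((m : Int) + 1) 1 = PySem.List.pyRange 0 (m : Int) 1 ++ [(m : Int)] from
        PySem.List.pyRange_one_succ_right (by positivity)]
      rw [List.foldl_append]
      simp only [List.foldl_cons, List.foldl_nil, beq_self_eq_true, Bool.and_true, Bool.true_and]
      rw [PySem.List.foldl_add (PySem.List.pyRange 0 (m : Int) 1)
        (fun d => dfsA j rest (i + 1) (k + (j - i) * d) (d == (m : Int)) true) 0]
      rw [List.map_congr_left (g := fun e => Wm j rest.length (i + 1) (-(k + (j - i) * e))) (by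
        intro d hdm
        rw [PySem.List.mem_pyRange_one] at hdm
        rw [show ((d == (m : Int))) = false from beq_eq_false_iff_ne.2 (ne_of_lt hdm.2)]
        rw [dfsA_free j rest (i + 1) (k + (j - i) * d) (by
          rcases h with h | h
          · by_cases hij : j < i + 1
            · exact Or.inr hij
            · exact Or.inl (by nlinarith [hdm.1])
          · exact Or.inr (by omega))])]
      rw [ih (i + 1) (k + (j - i) * (m : Int))
        (fun c' hc' => hd c' (List.mem_cons_of_mem c hc'))
        (by
          rcases h with h | h
          · by_cases hij : j < i + 1
            · exact Or.inr hij
            · exact Or.inl (by nlinarith [Int.natCast_nonneg m])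
          · exact Or.inr (by omega))]
      simp only [scanS, List.length_map, zero_add]

lemma dfsA_top (j : Int) (c0 : Char) (rest : List Char)
    (hd : ∀ c' ∈ (c0 :: rest), ∃ m : Nat, m < 10 ∧ c' = Nat.digitChar m)
    (hj : 0 ≤ j) (h0 : 1 ≤ pyDigitA c0 ∨ rest = []) :
    dfsA j (c0 :: rest) 0 0 true false = scanS j ((c0 :: rest).map pyDigitA) 0 0 - 1 := by
  obtain ⟨m, hm, hc⟩ := hd c0 (List.mem_cons_self)
  have hd0 : pyDigitA c0 = (m : Int) := by rw [hc]; exact pyDigitA_digitChar m hm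
  have hdrest : ∀ c' ∈ rest, ∃ m : Nat, m < 10 ∧ c' = Nat.digitChar m :=
    fun c' hc' => hd c' (List.mem_cons_of_mem c0 hc')
  simp only [dfsA, List.map_cons]
  rw [if_neg (by omega)]
  simp only [Bool.not_false, Bool.false_eq_true, if_false, if_true]
  rw [hd0]
  by_cases hm0 : (m : Int) = 0
  · have hrest : rest = [] := by
      rcases h0 with h0 | h0
      · rw [hd0] at h0; omega
      · exact h0
    subst hrest
    rw [hm0]
    rw [show PySem.List.pyRange 1 (0 + 1) 1 = [] from PySem.List.pyRange_one_eq_nil (by norm_num)]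
    simp only [List.foldl_nil, List.map_nil]
    simp [dfsA, scanS, PySem.List.pyRange_one_eq_nil]
  · have hm1 : 1 ≤ (m : Int) := by omega
    rw [show PySem.List.pyRange 1 ((m : Int) + 1) 1 = PySem.List.pyRange 1 (m : Int) 1 ++ [(m : Int)] from
      PySem.List.pyRange_one_succ_right (by omega)]
    rw [List.foldl_append]
    simp only [List.foldl_cons, List.foldl_nil, beq_self_eq_true, Bool.and_true, Bool.true_and]
    rw [PySem.List.foldl_add (PySem.List.pyRange 1 (m : Int) 1)
      (fun d => dfsA j rest (0 + 1) (0 + (j - 0) * d) (d == (m : Int)) true)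
      (dfsA j rest (0 + 1) 0 false false)]
    rw [List.map_congr_left (g := fun e => Wm j rest.length (0 + 1) (-(0 + (j - 0) * e))) (by
      intro d hdm
      rw [PySem.List.mem_pyRange_one] at hdm
      rw [show ((d == (m : Int))) = false from beq_eq_false_iff_ne.2 (ne_of_lt hdm.2)]
      rw [dfsA_free j rest (0 + 1) (0 + (j - 0) * d) (Or.inl (by nlinarith [hdm.1]))])]
    rw [dfsA_tight j rest (0 + 1) (0 + (j - 0) * (m : Int)) hdrest
      (Or.inl (by nlinarith [Int.natCast_nonneg m]))]
    rw [dfsA_skip j rest (0 + 1)]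
    simp only [scanS, List.length_map]
    rw [show PySem.List.pyRange 0 (m : Int) 1 = 0 :: PySem.List.pyRange 1 (m : Int) 1 from
      PySem.List.pyRange_one_cons (by omega)]
    simp only [List.map_cons, List.sum_cons]
    rw [show -((0 : Int) + (j - 0) * 0) = 0 by ring]
    ring

lemma toDigits_mem (n : Nat) : ∀ c ∈ Nat.toDigits 10 n, ∃ m : Nat, m < 10 ∧ c = Nat.digitChar m := by
  induction n using Nat.strong_induction_on with
  | _ n ih =>
    intro c hc
    by_cases hlt : n < 10
    · rw [Nat.toDigits_of_lt_base hlt] at hc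
      simp at hc
      exact ⟨n, hlt, hc⟩
    · rw [Nat.toDigits_of_base_le (by norm_num) (by omega)] at hc
      rcases List.mem_append.1 hc with h | h
      · exact ih (n / 10) (Nat.div_lt_self (by omega) (by norm_num)) c h
      · simp at h
        exact ⟨n % 10, Nat.mod_lt _ (by norm_num), h⟩

lemma toDigits_head (n : Nat) : ∃ (m : Nat) (rest : List Char),
    Nat.toDigits 10 n = Nat.digitChar m :: rest ∧ m < 10 ∧ (n ≠ 0 → 1 ≤ m) ∧ (n = 0 → rest = []) := by
  induction n using Nat.strong_induction_on with
  | _ n ih =>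
    by_cases hlt : n < 10
    · exact ⟨n, [], by rw [Nat.toDigits_of_lt_base hlt], hlt, fun h => by omega, fun _ => rfl⟩
    · obtain ⟨m, rest, heq, hm, hpos, _⟩ := ih (n / 10) (Nat.div_lt_self (by omega) (by norm_num))
      refine ⟨m, rest ++ [(n % 10).digitChar], ?_, hm, fun _ => hpos (by omega), fun h => by omega⟩
      rw [Nat.toDigits_of_base_le (by norm_num) (by omega), heq]
      simp

lemma getD_foldl_modify_add {α : Type} (l : List α) (f g : α → Int) (v : Int) :
    ∀ (d0 : PySem.Dict Int Int),
    (l.foldl (fun cur x => cur.modify (f x) 0 (· + g x)) d0).getD v 0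
      = d0.getD v 0 + (l.map (fun x => if f x = v then g x else 0)).sum := by
  induction l with
  | nil => simp
  | cons x l ih =>
    intro d0
    simp only [List.foldl_cons, List.map_cons, List.sum_cons]
    rw [ih]
    rw [PySem.Dict.getD_modify]
    split_ifs <;> (try subst_vars) <;> (try omega) <;> ring

lemma sum_zero_of_not_mem (l : List (Int × Int)) (k : Int) (h : ∀ p ∈ l, p.1 ≠ k) :
    (l.map (fun p => if p.1 = k then p.2 else 0)).sum = 0 := by
  induction l with
  | nil => simp
  | cons p l ih =>
    simp only [List.map_cons, List.sum_cons]
    rw [if_neg (h p (by simp)), ih (fun q hq => h q (by simp [hq]))]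
    ring

lemma sum_items_getD (d : PySem.Dict Int Int) (hnd : d.keys.Nodup) (k : Int) :
    (d.items.map (fun p => if p.1 = k then p.2 else 0)).sum = d.getD k 0 := by
  obtain ⟨l⟩ := d
  induction l with
  | nil => simp [PySem.Dict.getD, PySem.Dict.get?]
  | cons p l ih =>
    simp only [PySem.Dict.keys_mk, List.map_cons, List.nodup_cons] at hnd
    simp only [PySem.Dict.items, List.map_cons, List.sum_cons]
    rw [PySem.Dict.getD_eq_get?_getD, PySem.Dict.get?_mk_cons]
    by_cases hpk : p.1 = k
    · rw [if_pos hpk, if_pos (by simp [hpk])]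
      simp only [Option.getD_some]
      rw [sum_zero_of_not_mem l k (by
        intro q hq hqk
        exact hnd.1 (by rw [hpk, ← hqk]; exact List.mem_map_of_mem hq))]
      ring
    · rw [if_neg hpk, if_neg (by simp [hpk]), ← PySem.Dict.getD_eq_get?_getD]
      rw [ih (by simpa [PySem.Dict.keys_mk] using hnd.2)]
      ring

lemma list_sum_comm {α β : Type} (l : List α) (r : List β) (F : α → β → Int) :
    (l.map (fun x => (r.map (fun y => F x y)).sum)).sum
      = (r.map (fun y => (l.map (fun x => F x y)).sum)).sum := by
  induction l with
  | nil => simp [List.map_const]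
  | cons x l ih =>
    simp only [List.map_cons, List.sum_cons, ih]
    rw [← PySem.List.sum_map_add_int]

lemma nested_getD (j i v : Int) (ps : List (Int × Int)) : ∀ (cur0 : PySem.Dict Int Int),
    (ps.foldl
      (fun cur tc =>
        (PySem.List.pyRange 0 10 1).foldl
          (fun cur d => cur.modify (tc.1 + (j - i) * d) 0 (· + tc.2)) cur)
      cur0).getD v 0
    = cur0.getD v 0
      + (ps.map (fun tc =>
          ((PySem.List.pyRange 0 10 1).map (fun d => if tc.1 + (j - i) * d = v then tc.2 else 0)).sum)).sum := by
  induction ps with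
  | nil => simp
  | cons tc ps ih =>
    intro cur0
    simp only [List.foldl_cons, List.map_cons, List.sum_cons]
    rw [ih]
    rw [getD_foldl_modify_add (PySem.List.pyRange 0 10 1) (fun d => tc.1 + (j - i) * d)
      (fun _ => tc.2) v cur0]
    ring

lemma cur_getD (j i : Int) (prev : PySem.Dict Int Int) (hnd : prev.keys.Nodup) (v : Int) :
    ((prev.items.foldl
      (fun cur tc =>
        (PySem.List.pyRange 0 10 1).foldl
          (fun cur d => cur.modify (tc.1 + (j - i) * d) 0 (· + tc.2)) cur)
      (PySem.Dict.mk [])).getD v 0)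
      = ((PySem.List.pyRange 0 10 1).map (fun d => prev.getD (v - (j - i) * d) 0)).sum := by
  rw [nested_getD]
  rw [show (PySem.Dict.mk [] : PySem.Dict Int Int).getD v 0 = 0 from rfl, zero_add]
  rw [list_sum_comm prev.items (PySem.List.pyRange 0 10 1)
    (fun tc d => if tc.1 + (j - i) * d = v then tc.2 else 0)]
  refine congrArg List.sum ?_
  apply List.map_congr_left
  intro d _
  rw [List.map_congr_left (g := fun tc : Int × Int => if tc.1 = v - (j - i) * d then tc.2 else 0) (by
    intro tc _
    refine if_congr ⟨fun h => by linarith, fun h => by linarith⟩ rfl rfl)]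
  exact sum_items_getD prev hnd (v - (j - i) * d)

lemma cur_nodup (j i : Int) (prev : PySem.Dict Int Int) :
    ((prev.items.foldl
      (fun cur tc =>
        (PySem.List.pyRange 0 10 1).foldl
          (fun cur d => cur.modify (tc.1 + (j - i) * d) 0 (· + tc.2)) cur)
      (PySem.Dict.mk [])).keys.Nodup) := by
  have start : (PySem.Dict.mk [] : PySem.Dict Int Int).keys.Nodup := by
    simp [PySem.Dict.keys_mk]
  generalize (PySem.Dict.mk [] : PySem.Dict Int Int) = cur0 at start ⊢
  induction prev.items generalizing cur0 with
  | nil => simpa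
  | cons tc ps ih =>
    simp only [List.foldl_cons]
    exact ih _ (PySem.Dict.nodup_keys_foldl_modify_key (PySem.List.pyRange 0 10 1)
      (fun d => tc.1 + (j - i) * d) 0 (fun _ _ => (· + tc.2)) cur0 start)

lemma tables_spec (j : Int) (n : Nat) : ∀ (f a : Nat), a + f = n → ∀ (p : Nat), p ≤ n - a →
    ∃ dp, (((PySem.List.pyRange (a : Int) (n : Int) 1).reverse).foldl (buildStepB j)
            [PySem.Dict.mk [((0 : Int), (1 : Int))]])[p]? = some dp
      ∧ dp.keys.Nodup
      ∧ ∀ v, dp.getD v 0 = Wm j (n - a - p) ((a : Int) + p) v := by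
  intro f
  induction f with
  | zero =>
    intro a ha p hp
    have han : a = n := by omega
    subst han
    have hp0 : p = 0 := by omega
    subst hp0
    rw [show PySem.List.pyRange (a : Int) (a : Int) 1 = [] from PySem.List.pyRange_one_eq_nil (by omega)]
    simp only [List.reverse_nil, List.foldl_nil]
    refine ⟨PySem.Dict.mk [((0 : Int), (1 : Int))], rfl, by simp [PySem.Dict.keys_mk], ?_⟩
    intro v
    rw [show a - a - 0 = 0 from by omega]
    simp only [Wm]
    by_cases hv : v = 0
    · subst hv; rfl
    · rw [if_neg hv]
      rw [PySem.Dict.getD_eq_get?_getD, PySem.Dict.get?_mk_cons,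
        if_neg (by simp only [beq_iff_eq]; omega)]
      rfl
  | succ f ih =>
    intro a ha p hp
    have hlt : (a : Int) < (n : Int) := by omega
    rw [PySem.List.pyRange_one_cons hlt]
    simp only [List.reverse_cons, List.foldl_append, List.foldl_cons, List.foldl_nil]
    have hcast : ((a : Int) + 1) = ((a + 1 : Nat) : Int) := by push_cast; ring
    rw [hcast]
    obtain ⟨dp0, hdp0, hnd0, hW0⟩ := ih (a + 1) (by omega) 0 (by omega)
    set prevT := ((PySem.List.pyRange ((a + 1 : Nat) : Int) (n : Int) 1).reverse).foldl (buildStepB j)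
      [PySem.Dict.mk [((0 : Int), (1 : Int))]] with hprevT
    unfold buildStepB
    have hget : PySem.List.pyGetD prevT 0 (PySem.Dict.mk []) = dp0 := by
      rw [PySem.List.pyGetD_zero]
      rw [List.getD_eq_getElem?_getD, hdp0]
      rfl
    rw [hget]
    rw [PySem.List.insert_zero]
    have hW0' : ∀ w, dp0.getD w 0 = Wm j (n - (a + 1)) ((a : Int) + 1) w := by
      intro w
      rw [hW0 w, show ((a + 1 : Nat) : Int) + ((0 : Nat) : Int) = (a : Int) + 1 from by push_cast; ring,
        show n - (a + 1) - 0 = n - (a + 1) from by omega]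
    rcases Nat.eq_zero_or_pos p with hp0 | hppos
    · subst hp0
      refine ⟨_, rfl, cur_nodup j a dp0, ?_⟩
      intro v
      rw [cur_getD j a dp0 hnd0 v]
      simp only [Nat.cast_zero, add_zero]
      rw [show n - a - 0 = (n - (a + 1)) + 1 from by omega]
      simp only [Wm]
      refine congrArg List.sum ?_
      apply List.map_congr_left
      intro d _
      exact hW0' (v - (j - (a : Int)) * d)
    · obtain ⟨q, rfl⟩ : ∃ q, p = q + 1 := ⟨p - 1, by omega⟩
      obtain ⟨dp, hdp, hnd, hW⟩ := ih (a + 1) (by omega) q (by omega)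
      refine ⟨dp, ?_, hnd, ?_⟩
      · simpa only [List.getElem?_cons_succ] using hdp
      · intro v
        rw [hW v, show n - (a + 1) - q = n - a - (q + 1) from by omega,
          show ((a + 1 : Nat) : Int) + (q : Int) = (a : Int) + ((q + 1 : Nat) : Int) from by push_cast; ring]

lemma scan_fold (j : Int) (ds : List Int) (tables : List (PySem.Dict Int Int))
    (htab : ∀ (p : Nat), p ≤ ds.length →
      ∃ dp, tables[p]? = some dp ∧ ∀ v, dp.getD v 0 = Wm j (ds.length - p) (p : Int) v) :
    ∀ (f a : Nat), a + f = ds.length → ∀ (k0 c0 : Int),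
      (let tk := (PySem.List.pyRange (a : Int) (ds.length : Int) 1).foldl (scanStepB j ds tables) (k0, c0)
       if tk.1 = 0 then tk.2 + 1 else tk.2) = c0 + scanS j (ds.drop a) (a : Int) k0 := by
  intro f
  induction f with
  | zero =>
    intro a ha k0 c0
    have haa : a = ds.length := by omega
    rw [show PySem.List.pyRange (a : Int) (ds.length : Int) 1 = [] from
      PySem.List.pyRange_one_eq_nil (by omega)]
    simp only [List.foldl_nil]
    rw [haa, List.drop_length]
    simp only [scanS]
    split_ifs <;> ring
  | succ f ih =>
    intro a ha k0 c0
    have halt : a < ds.length := by omega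
    rw [PySem.List.pyRange_one_cons (by push_cast; omega)]
    simp only [List.foldl_cons]
    -- evaluate the first step
    obtain ⟨dp, hdp, hW⟩ := htab (a + 1) (by omega)
    have hstep : scanStepB j ds tables (k0, c0) (a : Int)
        = (k0 + (j - (a : Int)) * ds[a],
           c0 + ((PySem.List.pyRange 0 ds[a] 1).map
             (fun d => Wm j (ds.length - (a + 1)) (((a + 1 : Nat) : Int)) (-(k0 + (j - (a : Int)) * d)))).sum) := by
      have hdi : PySem.List.pyGetD ds ((a : Int)) 0 = ds[a] := by
        rw [PySem.List.pyGetD_natCast, List.getD_eq_getElem?_getD, List.getElem?_eq_getElem halt]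
        rfl
      have hgt : PySem.List.pyGetD tables ((a : Int) + 1) (PySem.Dict.mk []) = dp := by
        rw [show ((a : Int) + 1) = ((a + 1 : Nat) : Int) from by push_cast; ring,
          PySem.List.pyGetD_natCast, List.getD_eq_getElem?_getD, hdp]
        rfl
      simp only [scanStepB, hdi, hgt]
      rw [PySem.List.foldl_add (PySem.List.pyRange 0 ds[a] 1)
        (fun d => dp.getD (-(k0 + (j - (a : Int)) * d)) 0) c0]
      rw [List.map_congr_left (g := fun d =>
        Wm j (ds.length - (a + 1)) (((a + 1 : Nat) : Int)) (-(k0 + (j - (a : Int)) * d))) (by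
        intro d _
        exact hW (-(k0 + (j - (a : Int)) * d)))]
    rw [hstep]
    rw [show ((a : Int) + 1) = ((a + 1 : Nat) : Int) from by push_cast; ring]
    rw [ih (a + 1) (by omega) (k0 + (j - (a : Int)) * ds[a])
      (c0 + ((PySem.List.pyRange 0 ds[a] 1).map
         (fun d => Wm j (ds.length - (a + 1)) (((a + 1 : Nat) : Int)) (-(k0 + (j - (a : Int)) * d)))).sum)]
    rw [← List.getElem_cons_drop halt]
    simp only [scanS, List.length_drop]
    rw [show ((a + 1 : Nat) : Int) = (a : Int) + 1 from by push_cast; ring]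
    ring

lemma pyDigitB_digitChar (m : Nat) (hm : m < 10) : pyDigitB (Nat.digitChar m) = (m : Int) := by
  interval_cases m <;> decide

lemma countB_eq_solveA (N : Int) (hN : 0 ≤ N) : countB N = solveA (PySem.Int.toChars N) := by
  have hchars : PySem.Int.toChars N = Nat.toDigits 10 N.toNat := by
    unfold PySem.Int.toChars
    rw [if_neg (by omega)]
  obtain ⟨m0, rest, hcs, hm0, hpos, hzero⟩ := toDigits_head N.toNat
  have hcs0 : PySem.Int.toChars N = Nat.digitChar m0 :: rest := by rw [hchars, hcs]
  have hmem0 : ∀ c' ∈ PySem.Int.toChars N, ∃ m : Nat, m < 10 ∧ c' = Nat.digitChar m := by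
    rw [hchars]; exact toDigits_mem N.toNat
  simp only [countB, PySem.List.len_eq, List.length_map]
  rw [if_neg (by omega)]
  rw [show (PySem.Int.toChars N).map pyDigitB = (PySem.Int.toChars N).map pyDigitA from
    List.map_congr_left (fun c hc => by
      obtain ⟨m, hm, rfl⟩ := hmem0 c hc
      rw [pyDigitB_digitChar m hm, pyDigitA_digitChar m hm])]
  rw [PySem.List.foldl_add, zero_add]
  rw [solveA_eq]
  simp only [PySem.List.len_eq]
  refine congrArg List.sum ?_
  apply List.map_congr_left
  intro j hj
  rw [PySem.List.mem_pyRange_one] at hj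
  have htab : ∀ (p : Nat), p ≤ ((PySem.Int.toChars N).map pyDigitA).length →
      ∃ dp, (buildTablesB j ((PySem.Int.toChars N).length : Int))[p]? = some dp ∧
        ∀ v, dp.getD v 0
          = Wm j (((PySem.Int.toChars N).map pyDigitA).length - p) (p : Int) v := by
    intro p hp
    simp only [List.length_map] at hp
    obtain ⟨dp, h1, _, h3⟩ := tables_spec j (PySem.Int.toChars N).length
      (PySem.Int.toChars N).length 0 (by omega) p (by omega)
    refine ⟨dp, ?_, ?_⟩
    · rw [← h1]
      unfold buildTablesB
      norm_num
    · intro v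
      rw [h3 v]
      simp [List.length_map]
  have hB := scan_fold j ((PySem.Int.toChars N).map pyDigitA)
    (buildTablesB j ((PySem.Int.toChars N).length : Int)) htab
    ((PySem.Int.toChars N).map pyDigitA).length 0 (by omega) 0 0
  simp only [Nat.cast_zero, List.drop_zero, List.length_map, zero_add] at hB
  have hbeq : ∀ tk : Int × Int, (if tk.1 == 0 then tk.2 + 1 else tk.2)
      = (if tk.1 = 0 then tk.2 + 1 else tk.2) := by
    intro tk; simp [beq_iff_eq]
  rw [hbeq _, hB]
  rw [hcs0]
  rw [dfsA_top j (Nat.digitChar m0) rest (by rw [← hcs0]; exact hmem0) hj.1 (by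
    rcases Nat.eq_zero_or_pos N.toNat with h0 | h0
    · exact Or.inr (hzero h0)
    · left
      rw [pyDigitA_digitChar m0 hm0]
      have := hpos (by omega)
      omega)]

-- ===== VERDICT (by name: the statement is the Claim_ definition above) =====
theorem leverNumber_spec : Claim_equal_leverNumber := by
  intro left right _ hpre
  obtain ⟨hl, hr⟩ := hpre
  unfold Spec_leverNumber leverNumber leverNumber_alt
  rw [countB_eq_solveA right hr, countB_eq_solveA (left - 1) (by omega)]
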